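-- pv_equiv track=rewrite | github.com/Dormailler/Algorithm | 프로그래머스/unrated/135808. 과일 장수/과일 장수.py | solution
-- ===== SOURCE A (Python) =====
-- def solution(k, m, score):
--     st =[]
--     score = sorted(score,reverse=True)
--     i = 0
--     answer = 0
--     while i+m <= len(score):
--         st.append(score[i:i+m])
--         i += m
--     for i in st:
--         answer += m*min(i)
--     return answer
-- ===== SOURCE B (Python) =====
-- def solution(k, m, score):
--     s = sorted(score)
--     n = len(s)
--     return m * sum(s[i] for i in range(n % m, n, m))
-- ===== Notes on version B (the rewrite author's own statement) =====
-- stated objective: simpler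
-- what changed: Instead of building an explicit list of m-sized boxes of the descending sort and calling min() on each, B sorts ascending once and sums every m-th element starting at index n%m (each such element is exactly one box's minimum), multiplying the sum by m.
import Mathlib
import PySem

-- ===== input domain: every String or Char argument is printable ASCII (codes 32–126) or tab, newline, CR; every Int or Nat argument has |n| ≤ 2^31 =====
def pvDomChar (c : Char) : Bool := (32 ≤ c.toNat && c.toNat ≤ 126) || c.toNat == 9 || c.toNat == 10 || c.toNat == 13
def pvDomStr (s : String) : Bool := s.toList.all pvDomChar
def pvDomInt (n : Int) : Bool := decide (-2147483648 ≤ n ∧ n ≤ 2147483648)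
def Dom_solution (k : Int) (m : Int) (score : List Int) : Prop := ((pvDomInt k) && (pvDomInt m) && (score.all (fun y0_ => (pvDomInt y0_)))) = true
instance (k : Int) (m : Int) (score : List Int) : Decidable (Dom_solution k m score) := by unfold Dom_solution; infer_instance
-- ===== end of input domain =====

-- B changes the algorithm: no list of boxes and no min() — a strided sum over the ascending sort (objective: simpler).

-- ===== PORT A =====
-- the 'while i+m <= len(score)' loop; fuel bounds the iterations (with m ≥ 1, length+1 fuel is enough)
def solA_while (s : List Int) (m : Int) (i : Int) (st : List (List Int)) : Nat → List (List Int)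
  | 0 => st
  | fuel+1 =>
    if i + m ≤ (s.length : Int)
    then solA_while s m (i + m) (st ++ [PySem.List.slice s (some i) (some (i + m))]) fuel
    else st

def solution (k : Int) (m : Int) (score : List Int) : Int :=
  let s := PySem.List.sorted score (fun x => x) true
  let st := solA_while s m 0 [] (s.length + 1)
  -- Python min(i) raises on an empty box; boxes are nonempty under Pre_ (m ≥ 1), so getD 0 is exact there
  st.foldl (fun answer box => answer + m * ((PySem.List.min? box (fun x => x)).getD 0)) 0

-- ===== PORT B =====
def solution_alt (k : Int) (m : Int) (score : List Int) : Int :=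
  let s := PySem.List.sorted score (fun x => x) false
  let n : Int := s.length
  m * ((PySem.List.pyRange (PySem.Int.mod n m) n m).foldl
        (fun acc i => acc + PySem.List.pyGetD s i 0) 0)

-- ===== PRECONDITION & SPEC =====
-- Pre_ excludes m ≤ 0: there A's while loop never terminates (and B raises ZeroDivisionError at m = 0).
def Pre_solution (k : Int) (m : Int) (score : List Int) : Prop := 1 ≤ m
instance (k : Int) (m : Int) (score : List Int) : Decidable (Pre_solution k m score) := by unfold Pre_solution; infer_instance
def pvWitness_solution : Int × Int × List Int := (2, 3, [4, 1, 2, 5, 2, 1, 1, 2])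

def Spec_solution (k : Int) (m : Int) (score : List Int) (out : Int) : Prop := out = solution_alt k m score
instance (k : Int) (m : Int) (score : List Int) (out : Int) : Decidable (Spec_solution k m score out) := by unfold Spec_solution; infer_instance

-- ===== CLAIM (what is proved, stated in full; the proofs are below) =====
def Claim_equal_solution : Prop := ∀ (k : Int) (m : Int) (score : List Int), Dom_solution k m score → Pre_solution k m score → Spec_solution k m score (solution k m score)

-- ===== LEMMAS AND PROOFS =====

-- the chunk decomposition A's while loop computes
def chunkList (s : List Int) (M : Nat) : List (List Int) :=
  if h : 0 < M ∧ M ≤ s.length then s.take M :: chunkList (s.drop M) M else []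
termination_by s.length
decreasing_by simp; omega

lemma chunkList_nil (s : List Int) (M : Nat) (h : ¬ (0 < M ∧ M ≤ s.length)) :
    chunkList s M = [] := by rw [chunkList]; simp [h]

lemma chunkList_cons (s : List Int) (M : Nat) (h : 0 < M ∧ M ≤ s.length) :
    chunkList s M = s.take M :: chunkList (s.drop M) M := by rw [chunkList]; simp [h]

lemma solA_while_eq (m : Int) (hm : 1 ≤ m) (s : List Int) :
    ∀ (fuel : Nat) (i : Int) (st : List (List Int)), 0 ≤ i →
      s.length - i.toNat ≤ fuel →
      solA_while s m i st fuel = st ++ chunkList (s.drop i.toNat) m.toNat := by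
  intro fuel
  induction fuel with
  | zero =>
    intro i st hi hf
    have : ¬ (0 < m.toNat ∧ m.toNat ≤ (s.drop i.toNat).length) := by
      simp only [List.length_drop]; omega
    simp [solA_while, chunkList_nil _ _ this]
  | succ fuel ih =>
    intro i st hi hf
    by_cases hc : i + m ≤ (s.length : Int)
    · have hIm : (0:Int) ≤ i + m := by omega
      have hchunk : chunkList (s.drop i.toNat) m.toNat
          = (s.drop i.toNat).take m.toNat :: chunkList ((s.drop i.toNat).drop m.toNat) m.toNat := by
        apply chunkList_cons
        simp only [List.length_drop]; omega
      have hslice : PySem.List.slice s (some i) (some (i + m))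
          = (s.drop i.toNat).take m.toNat := by
        rw [PySem.List.slice_toNat s hi hIm]
        congr 1
        omega
      rw [solA_while, if_pos hc, ih (i + m) _ hIm (by omega), hchunk, hslice]
      have : (s.drop (i + m).toNat) = (s.drop i.toNat).drop m.toNat := by
        rw [List.drop_drop]; congr 1; omega
      rw [this]
      simp
    · have : ¬ (0 < m.toNat ∧ m.toNat ≤ (s.drop i.toNat).length) := by
        simp only [List.length_drop]; omega
      simp [solA_while, hc, chunkList_nil _ _ this]

-- descending sort is the reverse of the ascending sort (Int values: duplicates are equal values)
lemma sorted_rev_eq_reverse (xs : List Int) :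
    PySem.List.sorted xs (fun x => x) true = (PySem.List.sorted xs (fun x => x) false).reverse := by
  have h1 : ((PySem.List.sorted xs (fun x => x) true).reverse).Pairwise (fun a b => a ≤ b) := by
    rw [List.pairwise_reverse]
    exact PySem.List.sorted_pairwise_rev xs (fun x => x)
  have h2 : (PySem.List.sorted xs (fun x => x) false).Pairwise (fun a b => a ≤ b) :=
    PySem.List.sorted_pairwise xs (fun x => x)
  have hperm : ((PySem.List.sorted xs (fun x => x) true).reverse).Perm
      (PySem.List.sorted xs (fun x => x) false) :=
    ((List.reverse_perm _).trans (PySem.List.sorted_perm xs (fun x => x) true)).trans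
      (PySem.List.sorted_perm xs (fun x => x) false).symm
  have heq := PySem.List.eq_of_perm_of_pairwise_le_of_injective (fun x => x)
    (fun a b h => h) hperm h1 h2
  rw [← heq, List.reverse_reverse]

-- min of a nonempty descending list is its last element
lemma minD_pairwise_ge (l : List Int) (hne : l ≠ []) (hp : l.Pairwise (fun a b => b ≤ a)) :
    (PySem.List.min? l (fun x => x)).getD 0 = l.getLast hne := by
  obtain ⟨mv, hmv⟩ : ∃ mv, PySem.List.min? l (fun x => x) = some mv := by
    cases h : PySem.List.min? l (fun x => x) with
    | none => exact absurd ((PySem.List.min?_eq_none_iff l (fun x => x)).mp h) hne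
    | some mv => exact ⟨mv, rfl⟩
  have h1 : mv ≤ l.getLast hne := PySem.List.min?_isMin hmv _ (List.getLast_mem hne)
  have h2 : l.getLast hne ≤ mv := by
    have hrev : l.reverse.Pairwise (fun a b => a ≤ b) := by
      rw [List.pairwise_reverse]; exact hp
    have hmem : mv ∈ l.reverse := by
      rw [List.mem_reverse]; exact PySem.List.min?_mem hmv
    cases hR : l.reverse with
    | nil => simp [hR] at hmem
    | cons a t =>
      have ha : a = l.getLast hne := by
        have := List.head_reverse (l := l) (by simpa using hne)
        simp [hR] at this
        omega
      rw [hR] at hrev hmem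
      rcases List.mem_cons.mp hmem with h | h
      · omega
      · have := (List.pairwise_cons.mp hrev).1 mv h
        omega
  rw [hmv, Option.getD_some]
  omega

-- append the last element of a stride-m range
lemma pyRange_append_last (a b m : Int) (hm : 0 < m) (hab : a ≤ b) (hdvd : m ∣ b - a) :
    PySem.List.pyRange a (b + m) m = PySem.List.pyRange a b m ++ [b] := by
  obtain ⟨q, hq⟩ := hdvd
  have hq0 : 0 ≤ q := by nlinarith
  rw [PySem.List.pyRange_of_pos a (b + m) hm, PySem.List.pyRange_of_pos a b hm]
  have hcl : ((b + m - a + m - 1) / m).toNat = q.toNat + 1 := by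
    have : b + m - a + m - 1 = (m - 1) + (q + 1) * m := by linarith
    rw [this, Int.add_mul_ediv_right _ _ (by omega), Int.ediv_eq_zero_of_lt (by omega) (by omega)]
    omega
  by_cases hlt : a < b
  · have hcr : ((b - a + m - 1) / m).toNat = q.toNat := by
      have : b - a + m - 1 = (m - 1) + q * m := by linarith
      rw [this, Int.add_mul_ediv_right _ _ (by omega), Int.ediv_eq_zero_of_lt (by omega) (by omega)]
      omega
    rw [if_pos (by omega), if_pos hlt, hcl, hcr, List.range_succ]
    have hqc : ((q.toNat : Int)) = q := by omega
    simp only [List.map_append, List.map_cons, List.map_nil]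
    congr 2
    push_cast [hqc]
    linarith
  · have hab' : a = b := by omega
    have hq' : q = 0 := by nlinarith
    rw [if_pos (by omega), if_neg hlt, hcl]
    subst hab'
    have hq0' : q = 0 := by nlinarith
    subst hq0'
    simp

lemma pyRange_empty_of_le (a b m : Int) (hm : 0 < m) (h : b ≤ a) :
    PySem.List.pyRange a b m = [] := by
  rw [PySem.List.pyRange_of_pos a b hm, if_neg (by omega)]
  simp

-- the core equivalence: chunk minimums of the reversed list = the strided elements of the list
lemma bridge (m : Int) (hm : 1 ≤ m) :
    ∀ (N : Nat) (asc : List Int), asc.length ≤ N → asc.Pairwise (fun a b => a ≤ b) →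
      ((chunkList asc.reverse m.toNat).map
        (fun c => (PySem.List.min? c (fun x => x)).getD 0)).sum
      = ((PySem.List.pyRange (PySem.Int.mod (asc.length : Int) m) (asc.length : Int) m).map
          (fun i => PySem.List.pyGetD asc i 0)).sum := by
  intro N
  induction N with
  | zero =>
    intro asc hlen _
    have h0 : asc = [] := by
      cases asc with
      | nil => rfl
      | cons a t => simp at hlen
    subst h0
    have hmz : PySem.Int.mod 0 m = 0 := by
      rw [PySem.Int.mod_eq_emod_of_pos (by omega)]; simp
    rw [List.reverse_nil, chunkList_nil [] m.toNat (by rintro ⟨h1, h2⟩; simp at h2; omega)]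
    simp only [List.length_nil, Nat.cast_zero, hmz]
    rw [pyRange_empty_of_le 0 0 m (by omega) le_rfl]
    simp
  | succ N ih =>
    intro asc hlen hp
    set n : Int := (asc.length : Int) with hn
    have hmod := PySem.Int.mod_eq_emod_of_pos (a := n) (b := m) (by omega)
    by_cases hMn : m ≤ n
    · -- one full box exists
      have hM1 : 1 ≤ m.toNat := by omega
      have hMlen : m.toNat ≤ asc.reverse.length := by simp; omega
      rw [chunkList_cons _ _ ⟨by omega, hMlen⟩]
      have htk : asc.reverse.take m.toNat = (asc.drop (asc.length - m.toNat)).reverse := by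
        rw [List.take_reverse]
      have hdr : asc.reverse.drop m.toNat = (asc.take (asc.length - m.toNat)).reverse := by
        rw [List.drop_reverse]
      set asc' := asc.take (asc.length - m.toNat) with hasc'
      have hlen' : asc'.length = asc.length - m.toNat := by
        simp [hasc']
      have hp' : asc'.Pairwise (fun a b => a ≤ b) := hp.sublist (List.take_sublist _ _)
      have hIH := ih asc' (by omega) hp'
      -- the head chunk's min is asc[n - m]
      have hne : (asc.drop (asc.length - m.toNat)).reverse ≠ [] := by
        simp; omega
      have hchunkmin : (PySem.List.min? (asc.reverse.take m.toNat) (fun x => x)).getD 0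
          = PySem.List.pyGetD asc (n - m) 0 := by
        rw [htk, minD_pairwise_ge _ hne (by
          rw [List.pairwise_reverse]
          exact hp.sublist (List.drop_sublist _ _))]
        have hlt : asc.length - m.toNat < asc.length := by omega
        rw [List.getLast_reverse, List.head_drop, PySem.List.pyGetD_eq_getElem asc 0 (by omega) (by push_cast; omega)]
        congr 1
        omega
      -- split the range on the right
      have hr0 : 0 ≤ PySem.Int.mod n m := PySem.Int.mod_nonneg n (by omega)
      have hdvd : m ∣ (n - m) - PySem.Int.mod n m := by
        rw [hmod]
        refine ⟨(n / m) - 1, ?_⟩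
        have := Int.ediv_add_emod n m
        linarith
      have hrle : PySem.Int.mod n m ≤ n - m := by
        rw [hmod]
        have h1 : n % m < m := Int.emod_lt_of_pos n (by omega)
        have h2 : m ∣ n - n % m := ⟨n / m, by have := Int.ediv_add_emod n m; linarith⟩
        obtain ⟨c, hc⟩ := h2
        have : 1 ≤ c := by nlinarith [Int.emod_nonneg n (show m ≠ 0 by omega)]
        nlinarith
      have hsplit : PySem.List.pyRange (PySem.Int.mod n m) n m
          = PySem.List.pyRange (PySem.Int.mod n m) (n - m) m ++ [n - m] := by
        have := pyRange_append_last (PySem.Int.mod n m) (n - m) m (by omega) hrle hdvd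
        rw [← this]
        congr 1
        omega
      have hmod' : PySem.Int.mod (asc'.length : Int) m = PySem.Int.mod n m := by
        rw [PySem.Int.mod_eq_emod_of_pos (by omega), hmod]
        have : (asc'.length : Int) = n - m := by rw [hlen']; push_cast; omega
        rw [this, Int.sub_emod_right]
      have hlen'' : (asc'.length : Int) = n - m := by rw [hlen']; push_cast; omega
      -- indices below n - m read the same in asc and asc'
      have hcongr : ((PySem.List.pyRange (PySem.Int.mod n m) (n - m) m).map
            (fun i => PySem.List.pyGetD asc' i 0)).sum
          = ((PySem.List.pyRange (PySem.Int.mod n m) (n - m) m).map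
            (fun i => PySem.List.pyGetD asc i 0)).sum := by
        apply congrArg
        apply List.map_congr_left
        intro i hi
        rw [PySem.List.mem_pyRange_iff_of_pos (by omega)] at hi
        have hi0 : 0 ≤ i := by omega
        have hilt : i < (asc'.length : Int) := by omega
        rw [PySem.List.pyGetD_eq_getElem asc' 0 hi0 hilt,
            PySem.List.pyGetD_eq_getElem asc 0 hi0 (by omega)]
        simp [hasc']
      rw [List.map_cons, List.sum_cons, hdr, hIH, hmod', hlen'', hcongr, hchunkmin, hsplit]
      simp
      ring
    · -- no full box: both sides are 0
      have hcl : chunkList asc.reverse m.toNat = [] := by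
        apply chunkList_nil
        simp
        omega
      have hmodn : PySem.Int.mod n m = n := by
        rw [hmod]
        exact Int.emod_eq_of_lt (by positivity) (by omega)
      rw [hcl, hmodn, pyRange_empty_of_le n n m (by omega) le_rfl]
      simp

-- ===== VERDICT (by name: the statement is the Claim_ definition above) =====
theorem solution_spec : Claim_equal_solution := by
  intro k m score _ hpre
  unfold Spec_solution solution solution_alt
  simp only []
  set desc := PySem.List.sorted score (fun x => x) true with hdesc
  set asc := PySem.List.sorted score (fun x => x) false with hasc
  have hda : desc = asc.reverse := sorted_rev_eq_reverse score
  have hmain := bridge m hpre asc.length asc le_rfl (PySem.List.sorted_pairwise score _)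
  rw [solA_while_eq m hpre desc (desc.length + 1) 0 [] le_rfl (by omega)]
  rw [PySem.List.foldl_add _ (fun box => m * ((PySem.List.min? box (fun x => x)).getD 0)) 0,
      PySem.List.foldl_add _ (fun i => PySem.List.pyGetD asc i 0) 0]
  simp only [Int.toNat_zero, List.drop_zero, List.nil_append, zero_add]
  rw [hda, ← hmain, ← List.sum_map_mul_left]
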